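-- pv_equiv track=rewrite | github.com/namitdeb739/dotfiles | scripts/validate_vscode_jsonc.py | remove_trailing_commas
-- ===== SOURCE A (Python) =====
-- def remove_trailing_commas(text: str) -> str:
--     out: list[str] = []
--     i = 0
--     in_string = False
--     escape = False
--
--     while i < len(text):
--         ch = text[i]
--
--         if in_string:
--             out.append(ch)
--             if escape:
--                 escape = False
--             elif ch == "\\":
--                 escape = True
--             elif ch == '"':
--                 in_string = False
--             i += 1
--             continue
--
--         if ch == '"':
--             in_string = True
--             out.append(ch)
--             i += 1
--             continue
--
--         if ch == ",":
--             j = i + 1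
--             while j < len(text) and text[j] in " \t\r\n":
--                 j += 1
--             if j < len(text) and text[j] in "]}":
--                 i += 1
--                 continue
--
--         out.append(ch)
--         i += 1
--
--     return "".join(out)
-- ===== SOURCE B (Python) =====
-- def remove_trailing_commas(text: str) -> str:
--     out = []
--     pending = None  # a held "," plus the whitespace scanned after it, decision deferred
--     in_string = False
--     escape = False
--     for ch in text:
--         if in_string:
--             out.append(ch)
--             if escape:
--                 escape = False
--             elif ch == "\\":
--                 escape = True
--             elif ch == '"':
--                 in_string = False
--             continue
--         if pending is not None:
--             if ch in " \t\r\n":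
--                 pending.append(ch)
--                 continue
--             if ch in "]}":
--                 out.extend(pending[1:])  # drop the held comma, keep its whitespace
--             else:
--                 out.extend(pending)      # keep the comma
--             pending = None
--         if ch == ',':
--             pending = [","]
--         elif ch == '"':
--             in_string = True
--             out.append(ch)
--         else:
--             out.append(ch)
--     if pending is not None:
--         out.extend(pending)
--     return "".join(out)
-- ===== Notes on version B (the rewrite author's own statement) =====
-- stated objective: faster
-- what changed: Replaces A's per-comma lookahead rescan of the following whitespace by a single left-to-right pass that buffers a pending comma plus the whitespace after it and decides keep/drop when the next non-whitespace character arrives.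
import Mathlib
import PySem

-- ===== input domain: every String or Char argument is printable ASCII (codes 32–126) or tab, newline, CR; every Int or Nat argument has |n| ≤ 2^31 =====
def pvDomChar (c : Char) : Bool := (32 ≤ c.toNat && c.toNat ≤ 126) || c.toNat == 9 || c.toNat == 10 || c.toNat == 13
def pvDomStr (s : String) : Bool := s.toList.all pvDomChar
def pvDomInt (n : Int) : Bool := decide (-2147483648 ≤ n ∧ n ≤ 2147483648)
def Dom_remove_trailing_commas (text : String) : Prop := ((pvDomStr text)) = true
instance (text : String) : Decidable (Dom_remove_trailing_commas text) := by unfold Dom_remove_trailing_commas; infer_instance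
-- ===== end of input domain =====

-- B replaces A's per-comma lookahead rescans by one pass that buffers a pending comma
-- plus the whitespace after it (objective: faster, single pass instead of nested scans).

-- ===== PORT A =====
def pvIsWS (c : Char) : Bool := c = ' ' || c = '\t' || c = '\r' || c = '\n'

-- A's inner `while j < len(text) and text[j] in " \t\r\n": j += 1`, returning text[j] if any
def pvAScan : List Char → Option Char
  | [] => none
  | c :: rest => if pvIsWS c then pvAScan rest else some c

-- A's `j < len(text) and text[j] in "]}"`
def pvIsClose : Option Char → Bool
  | some c => c = ']' || c = '}'
  | none => false

def pvALoop : List Char → Bool → Bool → List Char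
  | [], _, _ => []
  | c :: rest, inStr, esc =>
    if inStr then
      c :: (if esc then pvALoop rest true false
            else if c = '\\' then pvALoop rest true true
            else if c = '"' then pvALoop rest false false
            else pvALoop rest true false)
    else if c = '"' then c :: pvALoop rest true false
    else if c = ',' && pvIsClose (pvAScan rest) then pvALoop rest false false
    else c :: pvALoop rest false false

def remove_trailing_commas (text : String) : String :=
  String.ofList (pvALoop text.toList false false)

-- ===== PORT B =====
-- single pass; `pending` buffers a held "," plus the whitespace scanned after it
def pvBLoop : List Char → Bool → Bool → Option (List Char) → List Char
  | [], _, _, pending => pending.getD []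
  | c :: rest, inStr, esc, pending =>
    if inStr then
      c :: (if esc then pvBLoop rest true false pending
            else if c = '\\' then pvBLoop rest true true pending
            else if c = '"' then pvBLoop rest false false pending
            else pvBLoop rest true false pending)
    else if pvIsWS c && pending.isSome then
      pvBLoop rest false false (some (pending.getD [] ++ [c]))
    else
      (match pending with
       | some p => if c = ']' || c = '}' then p.tail else p
       | none => []) ++
      (if c = ',' then pvBLoop rest false false (some [','])
       else if c = '"' then c :: pvBLoop rest true false none
       else c :: pvBLoop rest false false none)

def remove_trailing_commas_alt (text : String) : String :=
  String.ofList (pvBLoop text.toList false false none)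

-- ===== PRECONDITION & SPEC =====
def Spec_remove_trailing_commas (text : String) (out : String) : Prop := out = remove_trailing_commas_alt text
instance (text : String) (out : String) : Decidable (Spec_remove_trailing_commas text out) := by unfold Spec_remove_trailing_commas; infer_instance

-- ===== CLAIM (what is proved, stated in full; the proofs are below) =====
def Claim_equal_remove_trailing_commas : Prop := ∀ (text : String), Dom_remove_trailing_commas text → Spec_remove_trailing_commas text (remove_trailing_commas text)

-- ===== LEMMAS AND PROOFS =====

-- B's fall-through dispatch equals A's step, given the induction hypotheses at `rs`
lemma pvChain_eq (c : Char) (rs : List Char)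
    (ihS : ∀ esc, pvBLoop rs true esc none = pvALoop rs true esc)
    (ihF : pvBLoop rs false false none = pvALoop rs false false)
    (ihP : ∀ w, pvBLoop rs false false (some (',' :: w)) =
      if pvIsClose (pvAScan rs) then w ++ pvALoop rs false false
      else ',' :: (w ++ pvALoop rs false false)) :
    (if c = ',' then pvBLoop rs false false (some [','])
     else if c = '"' then c :: pvBLoop rs true false none
     else c :: pvBLoop rs false false none) = pvALoop (c :: rs) false false := by
  by_cases hc : c = ','
  · subst hc
    simp only [pvALoop, ihP []]
    by_cases h : pvIsClose (pvAScan rs) = true <;> simp [h]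
  · by_cases hq : c = '"'
    · subst hq; simp [pvALoop, ihS]
    · simp [pvALoop, hc, hq, ihF]

lemma pvKey (rest : List Char) :
    (∀ esc, pvBLoop rest true esc none = pvALoop rest true esc) ∧
    (pvBLoop rest false false none = pvALoop rest false false) ∧
    (∀ w, pvBLoop rest false false (some (',' :: w)) =
      if pvIsClose (pvAScan rest) then w ++ pvALoop rest false false
      else ',' :: (w ++ pvALoop rest false false)) := by
  induction rest with
  | nil =>
    refine ⟨fun _ => rfl, rfl, fun w => ?_⟩
    simp [pvBLoop, pvALoop, pvAScan, pvIsClose]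
  | cons c rs ih =>
    obtain ⟨ihS, ihF, ihP⟩ := ih
    refine ⟨?_, ?_, ?_⟩
    · intro esc
      simp only [pvBLoop, pvALoop]
      by_cases h1 : esc
      · simp [h1, ihS]
      · by_cases h2 : c = '\\'
        · simp [h1, h2, ihS]
        · by_cases h3 : c = '"'
          · simp [h1, h3, ihF]
          · simp [h1, h2, h3, ihS]
    · have h : pvBLoop (c :: rs) false false none =
          [] ++ (if c = ',' then pvBLoop rs false false (some [','])
           else if c = '"' then c :: pvBLoop rs true false none
           else c :: pvBLoop rs false false none) := by
        simp [pvBLoop]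
      rw [h, List.nil_append, pvChain_eq c rs ihS ihF ihP]
    · intro w
      by_cases hws : pvIsWS c = true
      · have hq : c ≠ '"' := by
          intro h; subst h; simp [pvIsWS] at hws
        have hcm : c ≠ ',' := by
          intro h; subst h; simp [pvIsWS] at hws
        have h1 : pvBLoop (c :: rs) false false (some (',' :: w))
            = pvBLoop rs false false (some (',' :: (w ++ [c]))) := by
          simp [pvBLoop, hws]
        have h2 : pvAScan (c :: rs) = pvAScan rs := by simp [pvAScan, hws]
        have h3 : pvALoop (c :: rs) false false = c :: pvALoop rs false false := by
          simp [pvALoop, hq, hcm]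
        rw [h1, ihP (w ++ [c]), h2, h3]
        by_cases h : pvIsClose (pvAScan rs) = true <;> simp [h]
      · have hstep : pvBLoop (c :: rs) false false (some (',' :: w))
            = (if c = ']' || c = '}' then w else ',' :: w) ++
              (if c = ',' then pvBLoop rs false false (some [','])
               else if c = '"' then c :: pvBLoop rs true false none
               else c :: pvBLoop rs false false none) := by
          simp [pvBLoop, hws]
        rw [hstep, pvChain_eq c rs ihS ihF ihP]
        have hscan : pvAScan (c :: rs) = some c := by simp [pvAScan, hws]
        have hic : pvIsClose (pvAScan (c :: rs)) = (c = ']' || c = '}') := by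
          rw [hscan]; rfl
        rw [hic]
        by_cases hcl : (c = ']' || c = '}') = true
        · simp [hcl]
        · simp [hcl]

-- ===== VERDICT (by name: the statement is the Claim_ definition above) =====
theorem remove_trailing_commas_spec : Claim_equal_remove_trailing_commas := by
  intro text _
  unfold Spec_remove_trailing_commas remove_trailing_commas remove_trailing_commas_alt
  rw [(pvKey text.toList).2.1]
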